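-- pv_equiv track=rewrite | github.com/raeez/chiral-bar-cobar | compute/lib/extended_ferm_ghost.py | bc_character
-- ===== SOURCE A (Python) =====
-- from math import comb
-- from typing import Dict, List, Optional, Tuple
--
-- def bc_character(d: int, max_level: int = 5) -> Dict[int, int]:
--     """Character (graded dimension) of bc(V) Fock space at dim V = d.
--
--     For a single bc pair (d=1), the Fock space character is:
--       ch(bc) = prod_{n>=1} (1 + q^n)^2
--
--     For d pairs:
--       ch(bc(V)) = prod_{n>=1} (1 + q^n)^{2d}
--
--     Returns {level: dim} for level = 0, 1, ..., max_level.
--     """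
--     # Compute product (1 + q^n)^{2d} through max_level
--     coeffs = [0] * (max_level + 1)
--     coeffs[0] = 1
--
--     for n in range(1, max_level + 1):
--         # Multiply by (1 + q^n)^{2d}
--         # Use binomial expansion: (1+q^n)^{2d} = sum_{k=0}^{2d} C(2d,k) q^{nk}
--         new_coeffs = [0] * (max_level + 1)
--         for level in range(max_level + 1):
--             if coeffs[level] == 0:
--                 continue
--             for k in range(2 * d + 1):
--                 target = level + n * k
--                 if target > max_level:
--                     break
--                 new_coeffs[target] += coeffs[level] * comb(2 * d, k)
--         coeffs = new_coeffs
--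
--     return {level: coeffs[level] for level in range(max_level + 1)}
-- ===== SOURCE B (Python) =====
-- def bc_character(d: int, max_level: int = 5):
--     """Character of bc(V) Fock space: coefficients of prod_{n>=1}(1+q^n)^{2d}.
--
--     Builds prod_{n=1}^{L}(1+q^n)^2 by two shift-add passes per n (no binomials),
--     then raises it to the d-th power by binary exponentiation with truncated
--     polynomial multiplication; for d <= 0 the power loop has nothing to do and
--     the base product is never needed, so it is not built."""
--     L = max_level
--
--     def mul(xs, ys):
--         out = [0] * (L + 1)
--         for i in range(L + 1):
--             xi = xs[i]
--             if xi:
--                 for j in range(L + 1 - i):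
--                     out[i + j] += xi * ys[j]
--         return out
--
--     result = [1] + [0] * L
--     if d > 0:
--         # base = prod_{n=1}^{L} (1+q^n)^2 truncated at degree L
--         base = [1] + [0] * L
--         for n in range(1, L + 1):
--             for _ in range(2):
--                 base = [base[j] + (base[j - n] if j >= n else 0) for j in range(L + 1)]
--         # result = base ** d, truncated
--         e = d
--         while e > 0:
--             if e % 2 == 1:
--                 result = mul(result, base)
--             base = mul(base, base)
--             e //= 2
--
--     return {level: result[level] for level in range(L + 1)}
-- ===== Notes on version B (the rewrite author's own statement) =====
-- stated objective: alternative
-- what changed: Instead of re-expanding (1+q^n)^{2d} by binomial coefficients for every factor, B builds prod(1+q^n)^2 with two shift-add passes per n (no binomials at all) and then raises that truncated polynomial to the d-th power by binary exponentiation with truncated multiplication (skipped entirely for d <= 0).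
-- intended difference: For d < 0 (a negative dimension, outside the intended use) with max_level >= 1, A's empty binomial range range(2d+1) wipes the whole table and A returns all zeros (even level 0); B's exponentiation loop simply does not run and it returns the empty-power character {0:1, rest 0}, which at least is a genuine character with constant term 1. — e.g. on bc_character(-1, 1): A returns [(0, 0), (1, 0)], B returns [(0, 1), (1, 0)]
import Mathlib
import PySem

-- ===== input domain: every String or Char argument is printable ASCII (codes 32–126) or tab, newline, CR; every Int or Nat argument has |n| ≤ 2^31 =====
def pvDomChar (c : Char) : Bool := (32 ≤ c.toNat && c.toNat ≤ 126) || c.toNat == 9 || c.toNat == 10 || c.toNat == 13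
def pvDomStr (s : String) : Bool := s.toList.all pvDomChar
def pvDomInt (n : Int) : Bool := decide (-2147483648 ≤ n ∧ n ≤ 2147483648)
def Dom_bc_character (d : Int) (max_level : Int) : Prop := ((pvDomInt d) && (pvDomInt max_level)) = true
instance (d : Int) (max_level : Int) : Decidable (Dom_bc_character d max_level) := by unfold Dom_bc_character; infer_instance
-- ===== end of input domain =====

-- B replaces A's per-factor binomial expansion of (1+q^n)^{2d} by building the truncated
-- ∏(1+q^n)^2 with shift-add passes (no binomials) and raising it to the d-th power by binary
-- exponentiation with truncated multiplication (objective: alternative algorithm, similar cost).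

-- ===== PORT A =====
-- math.comb(n, k); A only evaluates it with n = 2*d ≥ 0 (for d < 0 the k-range is empty)
def pvComb (n k : Nat) : Int := ((n.descFactorial k) / k.factorial : Nat)

-- A's inner `for k in range(2*d+1): … if target > max_level: break` loop; k counts up and
-- `rem` is the number of range elements left (Python's range is lazy, the break keeps the
-- loop from ever materialising range(2*d+1))
def aInner (S n level : Nat) (cl : Int) (E : Nat) : List Int → Nat → Nat → List Int
  | new, _, 0 => new
  | new, k, rem + 1 =>
    if level + n * k ≥ S then new
    else aInner S n level cl E
      (new.set (level + n * k) (new.getD (level + n * k) 0 + cl * pvComb E k)) (k + 1) rem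

def aStep (S E kcount n : Nat) (coeffs : List Int) : List Int :=
  (List.range S).foldl
    (fun new level =>
      if coeffs.getD level 0 = 0 then new
      else aInner S n level (coeffs.getD level 0) E new 0 kcount)
    (List.replicate S 0)

def bc_character (d : Int) (max_level : Int) : List (Int × Int) :=
  let S := (max_level + 1).toNat
  let coeffs := (List.replicate S 0).set 0 1
  let coeffs := (List.range' 1 (S - 1)).foldl
      (fun coeffs n => aStep S (2 * d).toNat (2 * d + 1).toNat n coeffs) coeffs
  (List.range S).map (fun l => (Int.ofNat l, coeffs.getD l 0))

-- ===== PORT B =====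
def bMul (S : Nat) (xs ys : List Int) : List Int :=
  (List.range S).foldl
    (fun out i =>
      if xs.getD i 0 = 0 then out
      else (List.range (S - i)).foldl
        (fun out j => out.set (i + j) (out.getD (i + j) 0 + xs.getD i 0 * ys.getD j 0)) out)
    (List.replicate S 0)

def bPass (S n : Nat) (base : List Int) : List Int :=
  (List.range S).map (fun j => base.getD j 0 + if n ≤ j then base.getD (j - n) 0 else 0)

-- `while e > 0: if e % 2 == 1: result = mul(result, base); base = mul(base, base); e //= 2`
-- (structural counter: e.toNat halves with e, so `fuel = e.toNat` never runs out)
def bPowAux (S : Nat) : Nat → List Int → List Int → Int → List Int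
  | fuel + 1, result, base, e =>
    if 0 < e then
      bPowAux S fuel (if PySem.Int.mod e 2 = 1 then bMul S result base else result)
        (bMul S base base) (PySem.Int.floordiv e 2)
    else result
  | 0, result, _, _ => result

def bPow (S : Nat) (result base : List Int) (e : Int) : List Int :=
  bPowAux S e.toNat result base e

def bc_character_alt (d : Int) (max_level : Int) : List (Int × Int) :=
  let S := (max_level + 1).toNat
  let result := 1 :: List.replicate (S - 1) 0
  let result :=
    if 0 < d then
      let base := 1 :: List.replicate (S - 1) 0
      let base := (List.range' 1 (S - 1)).foldl
          (fun b n => (List.range 2).foldl (fun b _ => bPass S n b) b) base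
      bPow S result base d
    else result
  (List.range S).map (fun l => (Int.ofNat l, result.getD l 0))

-- ===== PRECONDITION & SPEC =====
-- A raises IndexError (on the assignment coeffs[0] = 1) exactly when max_level < 0.
def Pre_bc_character (d : Int) (max_level : Int) : Prop := 0 ≤ max_level
instance (d : Int) (max_level : Int) : Decidable (Pre_bc_character d max_level) := by
  unfold Pre_bc_character; infer_instance

def pvWitness_bc_character : Int × Int := (2, 3)

-- For d < 0 (a negative dimension, outside the intended use) with max_level ≥ 1, A's empty
-- binomial range range(2d+1) wipes the whole table and A returns all zeros (even level 0);
-- B's exponentiation loop simply does not run and it returns the empty-power character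
-- {0: 1, rest 0}, a genuine character with constant term 1.
def D_bc_character (d : Int) (max_level : Int) : Prop := d < 0 ∧ 1 ≤ max_level
instance (d : Int) (max_level : Int) : Decidable (D_bc_character d max_level) := by
  unfold D_bc_character; infer_instance

def Spec_bc_character (d : Int) (max_level : Int) (out : List (Int × Int)) : Prop :=
  ¬ D_bc_character d max_level → out = bc_character_alt d max_level
instance (d : Int) (max_level : Int) (out : List (Int × Int)) :
    Decidable (Spec_bc_character d max_level out) := by unfold Spec_bc_character; infer_instance

def pvDiffWitness_bc_character : Int × Int := (-1, 1)
def pvDiffWitnessOut_bc_character : (List (Int × Int)) × (List (Int × Int)) :=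
  ([(0, 0), (1, 0)], [(0, 1), (1, 0)])

-- ===== CLAIM (what is proved, stated in full; the proofs are below) =====
def Claim_unchanged_bc_character : Prop := ∀ (d : Int) (max_level : Int),
  Dom_bc_character d max_level → Pre_bc_character d max_level →
  Spec_bc_character d max_level (bc_character d max_level)
def Claim_changed_bc_character : Prop :=
  Dom_bc_character (pvDiffWitness_bc_character.1) (pvDiffWitness_bc_character.2) ∧
  Pre_bc_character (pvDiffWitness_bc_character.1) (pvDiffWitness_bc_character.2) ∧
  D_bc_character (pvDiffWitness_bc_character.1) (pvDiffWitness_bc_character.2) ∧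
  bc_character (pvDiffWitness_bc_character.1) (pvDiffWitness_bc_character.2) = pvDiffWitnessOut_bc_character.1 ∧
  bc_character_alt (pvDiffWitness_bc_character.1) (pvDiffWitness_bc_character.2) = pvDiffWitnessOut_bc_character.2 ∧
  pvDiffWitnessOut_bc_character.1 ≠ pvDiffWitnessOut_bc_character.2
def Claim_exact_bc_character : Prop := ∀ (d : Int) (max_level : Int),
  Dom_bc_character d max_level → Pre_bc_character d max_level → D_bc_character d max_level →
  bc_character d max_level ≠ bc_character_alt d max_level

-- ===== LEMMAS AND PROOFS =====
theorem pvGetD_set (xs : List Int) (i t : Nat) (a : Int) :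
    (xs.set i a).getD t 0 = if i = t ∧ t < xs.length then a else xs.getD t 0 := by
  rcases Nat.lt_or_ge t xs.length with h | h
  · simp [List.getD_eq_getElem?_getD, h]
    split_ifs with h1 h2 <;> simp_all
  · simp [List.getD_eq_getElem?_getD, Nat.not_lt.2 h]

theorem pvScatter_length (f : Nat → Nat) (v : Nat → Int) (ks : List Nat) (init : List Int) :
    (ks.foldl (fun out k => out.set (f k) (out.getD (f k) 0 + v k)) init).length = init.length := by
  induction ks generalizing init with
  | nil => rfl
  | cons k ks ih => rw [List.foldl_cons, ih, List.length_set]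

theorem pvScatter_getD (f : Nat → Nat) (v : Nat → Int) (ks : List Nat) (init : List Int)
    (hf : ∀ k ∈ ks, f k < init.length) (t : Nat) :
    (ks.foldl (fun out k => out.set (f k) (out.getD (f k) 0 + v k)) init).getD t 0
      = init.getD t 0 + (ks.map (fun k => if f k = t then v k else 0)).sum := by
  induction ks generalizing init with
  | nil => simp
  | cons k ks ih =>
    have hlen : (init.set (f k) (init.getD (f k) 0 + v k)).length = init.length := by simp
    rw [List.foldl_cons, ih _ (by rw [hlen]; exact fun x hx => hf x (List.mem_cons_of_mem _ hx))]
    rw [List.map_cons, List.sum_cons, pvGetD_set]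
    have hk := hf k List.mem_cons_self
    by_cases he : f k = t
    · subst he; simp [hk]; ring
    · simp [he]

theorem aInner_length (S n level : Nat) (cl : Int) (E : Nat) :
    ∀ (rem k : Nat) (new : List Int), (aInner S n level cl E new k rem).length = new.length := by
  intro rem
  induction rem with
  | zero => intro k new; rfl
  | succ rem ih =>
    intro k new
    rw [aInner]
    split
    · rfl
    · rw [ih]; simp

theorem aInner_getD (S n level : Nat) (cl : Int) (E : Nat) (hn : 1 ≤ n) :
    ∀ (rem k : Nat) (new : List Int), new.length = S → ∀ t, t < S →
    (aInner S n level cl E new k rem).getD t 0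
      = new.getD t 0 + ((List.range' k rem).map
          (fun k => if level + n * k = t then cl * pvComb E k else 0)).sum := by
  intro rem
  induction rem with
  | zero => intro k new _ t _; simp [aInner]
  | succ rem ih =>
    intro k new hlen t ht
    rw [aInner, List.range'_succ]
    by_cases hbr : level + n * k ≥ S
    · rw [if_pos hbr]
      have hz : ∀ x ∈ (k :: List.range' (k + 1) rem).map
          (fun k => if level + n * k = t then cl * pvComb E k else 0), x = 0 := by
        intro x hx
        rcases List.mem_map.1 hx with ⟨k', hk', rfl⟩
        have hkk : k ≤ k' := by
          rcases hk' with _ | hk'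
          · exact Nat.le_refl _
          · exact le_trans (Nat.le_succ _) (List.mem_range'_1.1 (by assumption)).1
        have hge : level + n * k' ≥ S := le_trans hbr (by
          have := Nat.mul_le_mul_left n hkk
          omega)
        have hne : level + n * k' ≠ t := by omega
        simp [hne]
      rw [List.sum_eq_zero hz]; ring
    · rw [if_neg hbr]
      have hlt : level + n * k < S := by omega
      rw [ih (k + 1) _ (by simp [hlen]) t ht]
      rw [pvGetD_set, List.map_cons, List.sum_cons]
      by_cases he : level + n * k = t
      · rw [if_pos ⟨he, by omega⟩, if_pos he, he]; ring
      · rw [if_neg (by intro h; exact he h.1), if_neg he]; ring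

theorem pvFoldAdd_getD {γ : Type} (S : Nat) (step : List Int → γ → List Int) (g : γ → Nat → Int)
    (h : ∀ (new : List Int) (x : γ), new.length = S →
      (step new x).length = S ∧ ∀ t, t < S → (step new x).getD t 0 = new.getD t 0 + g x t) :
    ∀ (ls : List γ) (init : List Int), init.length = S →
    ((ls.foldl step init).length = S ∧
     ∀ t, t < S → (ls.foldl step init).getD t 0 = init.getD t 0 + (ls.map (fun x => g x t)).sum) := by
  intro ls
  induction ls with
  | nil => intro init h0; exact ⟨h0, by simp⟩
  | cons x ls ih =>
    intro init h0
    obtain ⟨hl, hv⟩ := h init x h0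
    obtain ⟨hl2, hv2⟩ := ih (step init x) hl
    refine ⟨hl2, fun t ht => ?_⟩
    rw [List.foldl_cons] at *
    rw [hv2 t ht, hv t ht, List.map_cons, List.sum_cons]; ring

theorem pvSumRange (n : Nat) (f : Nat → Int) :
    ((List.range n).map f).sum = ∑ i ∈ Finset.range n, f i := by
  induction n with
  | zero => simp
  | succ m ih => rw [List.range_succ, Finset.sum_range_succ]; simp [ih]

theorem aStep_spec (S E kcount n : Nat) (coeffs : List Int) (hn : 1 ≤ n) :
    (aStep S E kcount n coeffs).length = S ∧ ∀ t, t < S →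
    (aStep S E kcount n coeffs).getD t 0
      = ∑ level ∈ Finset.range S, ∑ k ∈ Finset.range kcount,
          (if level + n * k = t then coeffs.getD level 0 * pvComb E k else 0) := by
  have h := pvFoldAdd_getD S
    (fun new level =>
      if coeffs.getD level 0 = 0 then new
      else aInner S n level (coeffs.getD level 0) E new 0 kcount)
    (fun level t => ((List.range kcount).map
        (fun k => if level + n * k = t then coeffs.getD level 0 * pvComb E k else 0)).sum)
    (by
      intro new level hlen
      dsimp only
      by_cases h0 : coeffs.getD level 0 = 0
      · refine ⟨by rw [if_pos h0]; exact hlen, fun t ht => ?_⟩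
        rw [if_pos h0]
        have : ∀ x ∈ (List.range kcount).map
            (fun k => if level + n * k = t then coeffs.getD level 0 * pvComb E k else 0), x = 0 := by
          intro x hx
          rcases List.mem_map.1 hx with ⟨k, _, rfl⟩
          rw [h0]; simp
        rw [List.sum_eq_zero this]; ring
      · refine ⟨by rw [if_neg h0, aInner_length, hlen], fun t ht => ?_⟩
        rw [if_neg h0, aInner_getD S n level _ E hn kcount 0 new hlen t ht,
          ← List.range_eq_range'])
    (List.range S) (List.replicate S 0) (by simp)
  unfold aStep
  refine ⟨h.1, fun t ht => ?_⟩
  rw [h.2 t ht]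
  have hz : (List.replicate S (0:Int)).getD t 0 = 0 := by
    simp [List.getD_eq_getElem?_getD, List.getElem?_replicate, ht]
  rw [hz, zero_add, pvSumRange]
  exact Finset.sum_congr rfl fun level _ => by dsimp only; rw [pvSumRange]

def pvRepr (S : Nat) (xs : List Int) (F : PowerSeries ℤ) : Prop :=
  xs.length = S ∧ ∀ l, l < S → xs.getD l 0 = PowerSeries.coeff l F

theorem coeff_one_add_X_pow (n E t : Nat) :
    PowerSeries.coeff t ((1 + PowerSeries.X ^ n) ^ E : PowerSeries ℤ)
      = ∑ k ∈ Finset.range (E + 1), if t = n * k then (pvComb E k) else 0 := by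
  rw [add_comm, add_pow]
  rw [map_sum]
  refine Finset.sum_congr rfl fun k hk => ?_
  rw [one_pow, mul_one, ← pow_mul]
  rw [← map_natCast (PowerSeries.C (R := ℤ)) (E.choose k), mul_comm,
    PowerSeries.coeff_C_mul, PowerSeries.coeff_X_pow]
  rw [show pvComb E k = (E.choose k : Int) from by
    rw [pvComb, Nat.choose_eq_descFactorial_div_factorial]]
  split <;> simp

theorem aStep_repr (S E n : Nat) (coeffs : List Int) (F : PowerSeries ℤ)
    (hn : 1 ≤ n) (hr : pvRepr S coeffs F) :
    pvRepr S (aStep S E (E + 1) n coeffs) (F * (1 + PowerSeries.X ^ n) ^ E) := by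
  obtain ⟨hlen, hco⟩ := hr
  obtain ⟨hl2, hv2⟩ := aStep_spec S E (E + 1) n coeffs hn
  refine ⟨hl2, fun t ht => ?_⟩
  rw [hv2 t ht, PowerSeries.coeff_mul, Finset.Nat.sum_antidiagonal_eq_sum_range_succ_mk]
  have hsub : Finset.range (t + 1) ⊆ Finset.range S := by
    intro x hx; simp only [Finset.mem_range] at *; omega
  rw [← Finset.sum_subset hsub (by
    intro level hl hnl
    simp only [Finset.mem_range] at hl hnl
    refine Finset.sum_eq_zero fun k _ => ?_
    rw [if_neg (by omega)])]
  refine Finset.sum_congr rfl fun level hl => ?_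
  simp only [Finset.mem_range] at hl
  rw [coeff_one_add_X_pow, Finset.mul_sum, ← hco level (by omega)]
  refine Finset.sum_congr rfl fun k _ => ?_
  rw [mul_ite, mul_zero]
  exact if_congr (by omega) rfl rfl

theorem pvGetD_map_range (S t : Nat) (f : Nat → Int) (ht : t < S) :
    ((List.range S).map f).getD t 0 = f t := by
  simp [List.getD_eq_getElem?_getD, List.getElem?_range, ht]

theorem bPass_repr (S n : Nat) (base : List Int) (F : PowerSeries ℤ)
    (hr : pvRepr S base F) :
    pvRepr S (bPass S n base) (F * (1 + PowerSeries.X ^ n)) := by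
  obtain ⟨hlen, hco⟩ := hr
  refine ⟨by simp [bPass], fun t ht => ?_⟩
  unfold bPass
  rw [pvGetD_map_range S t _ ht]
  rw [mul_add, mul_one, map_add, PowerSeries.coeff_mul_X_pow', ← hco t ht]
  by_cases h : n ≤ t
  · rw [if_pos h, if_pos h, ← hco (t - n) (by omega)]
  · rw [if_neg h, if_neg h]

theorem bMul_spec (S : Nat) (xs ys : List Int) :
    (bMul S xs ys).length = S ∧ ∀ t, t < S →
    (bMul S xs ys).getD t 0
      = ∑ i ∈ Finset.range S, ∑ j ∈ Finset.range (S - i),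
          (if i + j = t then xs.getD i 0 * ys.getD j 0 else 0) := by
  have h := pvFoldAdd_getD S
    (fun out i =>
      if xs.getD i 0 = 0 then out
      else (List.range (S - i)).foldl
        (fun out j => out.set (i + j) (out.getD (i + j) 0 + xs.getD i 0 * ys.getD j 0)) out)
    (fun i t => ((List.range (S - i)).map
        (fun j => if i + j = t then xs.getD i 0 * ys.getD j 0 else 0)).sum)
    (by
      intro out i hlen
      dsimp only
      by_cases h0 : xs.getD i 0 = 0
      · refine ⟨by rw [if_pos h0]; exact hlen, fun t ht => ?_⟩
        rw [if_pos h0]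
        have : ∀ x ∈ (List.range (S - i)).map
            (fun j => if i + j = t then xs.getD i 0 * ys.getD j 0 else 0), x = 0 := by
          intro x hx
          rcases List.mem_map.1 hx with ⟨j, _, rfl⟩
          rw [h0]; simp
        rw [List.sum_eq_zero this]; ring
      · refine ⟨by rw [if_neg h0, pvScatter_length]; exact hlen, fun t ht => ?_⟩
        rw [if_neg h0,
          pvScatter_getD (fun j => i + j) (fun j => xs.getD i 0 * ys.getD j 0) _ out
            (by intro j hj; simp only [List.mem_range] at hj; rw [hlen]; show i + j < S; omega) t])
    (List.range S) (List.replicate S 0) (by simp)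
  unfold bMul
  refine ⟨h.1, fun t ht => ?_⟩
  rw [h.2 t ht]
  have hz : (List.replicate S (0:Int)).getD t 0 = 0 := by
    simp [List.getD_eq_getElem?_getD, List.getElem?_replicate, ht]
  rw [hz, zero_add, pvSumRange]
  exact Finset.sum_congr rfl fun i _ => by dsimp only; rw [pvSumRange]

theorem bMul_repr (S : Nat) (xs ys : List Int) (F G : PowerSeries ℤ)
    (hx : pvRepr S xs F) (hy : pvRepr S ys G) : pvRepr S (bMul S xs ys) (F * G) := by
  obtain ⟨hxl, hxc⟩ := hx
  obtain ⟨hyl, hyc⟩ := hy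
  obtain ⟨hl, hv⟩ := bMul_spec S xs ys
  refine ⟨hl, fun t ht => ?_⟩
  rw [hv t ht, PowerSeries.coeff_mul, Finset.Nat.sum_antidiagonal_eq_sum_range_succ_mk]
  have hsub : Finset.range (t + 1) ⊆ Finset.range S := by
    intro x hx; simp only [Finset.mem_range] at *; omega
  rw [← Finset.sum_subset hsub (by
    intro i hi hni
    simp only [Finset.mem_range] at hi hni
    refine Finset.sum_eq_zero fun j _ => ?_
    rw [if_neg (by omega)])]
  refine Finset.sum_congr rfl fun i hi => ?_
  simp only [Finset.mem_range] at hi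
  have : ∀ j ∈ Finset.range (S - i),
      (if i + j = t then xs.getD i 0 * ys.getD j 0 else 0)
        = (if j = t - i then xs.getD i 0 * ys.getD j 0 else 0) := by
    intro j hj
    exact if_congr (by omega) rfl rfl
  rw [Finset.sum_congr rfl this, Finset.sum_ite_eq' (Finset.range (S - i)) (t - i)]
  rw [if_pos (by simp only [Finset.mem_range]; omega)]
  rw [hxc i (by omega), hyc (t - i) (by omega)]

theorem bPowAux_repr (S : Nat) : ∀ (m : Nat) (e : Int), e.toNat ≤ m →
    ∀ (result base : List Int) (R B : PowerSeries ℤ),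
    pvRepr S result R → pvRepr S base B →
    pvRepr S (bPowAux S m result base e) (R * B ^ e.toNat) := by
  intro m
  induction m with
  | zero =>
    intro e he result base R B hr hb
    have : e.toNat = 0 := by omega
    rw [this, pow_zero, mul_one]
    exact hr
  | succ m ih =>
    intro e he result base R B hr hb
    rw [bPowAux]
    by_cases hpos : 0 < e
    · rw [if_pos hpos]
      have hm : PySem.Int.mod e 2 = e % 2 := PySem.Int.mod_eq_emod_of_pos (by omega)
      have hf : PySem.Int.floordiv e 2 = e / 2 := PySem.Int.floordiv_eq_ediv_of_pos (by omega)
      rw [hm, hf]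
      have hle : (e / 2).toNat ≤ m := by omega
      have hres : pvRepr S (if e % 2 = 1 then bMul S result base else result)
          (if e % 2 = 1 then R * B else R) := by
        split_ifs with h1
        · exact bMul_repr S result base R B hr hb
        · exact hr
      have := ih (e / 2) hle _ (bMul S base base)
        (if e % 2 = 1 then R * B else R) (B * B) hres (bMul_repr S base base B B hb hb)
      have heq : (if e % 2 = 1 then R * B else R) * (B * B) ^ ((e / 2).toNat)
          = R * B ^ e.toNat := by
        have h2 : (B * B) ^ ((e / 2).toNat) = B ^ (2 * (e / 2).toNat) := by
          rw [two_mul, pow_add, ← mul_pow]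
        by_cases h1 : e % 2 = 1
        · rw [if_pos h1, h2, show e.toNat = 2 * (e / 2).toNat + 1 from by omega,
            pow_succ]
          ring
        · rw [if_neg h1, h2, show e.toNat = 2 * (e / 2).toNat from by omega]
      rw [heq] at this
      exact this
    · rw [if_neg hpos]
      have : e.toNat = 0 := by omega
      rw [this, pow_zero, mul_one]
      exact hr

theorem bPow_repr (S : Nat) (e : Int) (result base : List Int) (R B : PowerSeries ℤ)
    (hr : pvRepr S result R) (hb : pvRepr S base B) :
    pvRepr S (bPow S result base e) (R * B ^ e.toNat) :=
  bPowAux_repr S e.toNat e (le_refl _) result base R B hr hb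

theorem pvRepr_one (S : Nat) (hS : 1 ≤ S) : pvRepr S (1 :: List.replicate (S - 1) 0) 1 := by
  refine ⟨by simp; omega, fun l hl => ?_⟩
  rw [PowerSeries.coeff_one]
  cases l with
  | zero => rfl
  | succ l =>
    rw [if_neg (by omega)]
    show (List.replicate (S - 1) (0:Int)).getD l 0 = 0
    have hl' : l < S - 1 := by omega
    simp [List.getD_eq_getElem?_getD, List.getElem?_replicate, hl']

theorem pvInitA (S : Nat) (hS : 1 ≤ S) :
    (List.replicate S (0:Int)).set 0 1 = 1 :: List.replicate (S - 1) 0 := by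
  cases S with
  | zero => omega
  | succ S => rw [List.replicate_succ]; rfl

theorem pvFold_repr (S : Nat) (step : List Int → Nat → List Int)
    (fp : PowerSeries ℤ → Nat → PowerSeries ℤ) (ls : List Nat)
    (h : ∀ c F n, n ∈ ls → pvRepr S c F → pvRepr S (step c n) (fp F n)) :
    ∀ (init : List Int) (F0 : PowerSeries ℤ), pvRepr S init F0 →
    pvRepr S (ls.foldl step init) (ls.foldl fp F0) := by
  induction ls with
  | nil => intro init F0 h0; exact h0
  | cons n ls ih =>
    intro init F0 h0
    exact ih (fun c F n' hm hr => h c F n' (List.mem_cons_of_mem _ hm) hr) _ _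
      (h init F0 n List.mem_cons_self h0)

theorem pvFoldMul (h : Nat → PowerSeries ℤ) :
    ∀ (ls : List Nat) (F0 : PowerSeries ℤ),
    ls.foldl (fun F n => F * h n) F0 = F0 * (ls.map h).prod := by
  intro ls
  induction ls with
  | nil => intro F0; simp
  | cons n ls ih => intro F0; rw [List.foldl_cons, ih, List.map_cons, List.prod_cons]; ring

theorem pvProdPow (g : Nat → PowerSeries ℤ) (ls : List Nat) (k : Nat) :
    (ls.map (fun n => g n ^ k)).prod = ((ls.map g).prod) ^ k := by
  induction ls with
  | nil => simp
  | cons n ls ih => simp [List.map_cons, List.prod_cons, ih, mul_pow]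

theorem pvMain (d max_level : Int) (hd : 0 ≤ d) (hm : 0 ≤ max_level) :
    bc_character d max_level = bc_character_alt d max_level := by
  unfold bc_character bc_character_alt
  simp only []
  set S := (max_level + 1).toNat with hSdef
  have hS : 1 ≤ S := by omega
  set E := (2 * d).toNat with hE
  have hkc : (2 * d + 1).toNat = E + 1 := by omega
  rw [hkc]
  set ls := List.range' 1 (S - 1) with hls
  have hmem : ∀ n ∈ ls, 1 ≤ n := fun n hn => (List.mem_range'_1.1 hn).1
  have hA : pvRepr S (ls.foldl (fun coeffs n => aStep S E (E + 1) n coeffs)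
      ((List.replicate S 0).set 0 1))
      (ls.foldl (fun F n => F * (1 + PowerSeries.X ^ n) ^ E) 1) := by
    refine pvFold_repr S _ _ ls (fun c F n hn hr => aStep_repr S E n c F (hmem n hn) hr) _ _ ?_
    rw [pvInitA S hS]; exact pvRepr_one S hS
  by_cases hdp : 0 < d
  · rw [if_pos hdp]
    have hpass2 : ∀ (n : Nat) (b : List Int),
        (List.range 2).foldl (fun b _ => bPass S n b) b = bPass S n (bPass S n b) := by
      intro n b; rfl
    have hB : pvRepr S (ls.foldl (fun b n => (List.range 2).foldl (fun b _ => bPass S n b) b)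
        (1 :: List.replicate (S - 1) 0))
        (ls.foldl (fun F n => F * ((1 + PowerSeries.X ^ n) * (1 + PowerSeries.X ^ n))) 1) := by
      refine pvFold_repr S _ _ ls (fun c F n hn hr => ?_) _ _ (pvRepr_one S hS)
      rw [hpass2]
      have := bPass_repr S n _ _ (bPass_repr S n _ _ hr)
      rwa [mul_assoc] at this
    have hres := bPow_repr S d _ _ 1 _ (pvRepr_one S hS) hB
    have hser : ls.foldl (fun F n => F * (1 + PowerSeries.X ^ n) ^ E) (1 : PowerSeries ℤ)
        = 1 * (ls.foldl (fun F n => F * ((1 + PowerSeries.X ^ n) * (1 + PowerSeries.X ^ n)))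
            (1 : PowerSeries ℤ)) ^ d.toNat := by
      rw [pvFoldMul (fun n => ((1 + PowerSeries.X ^ n : PowerSeries ℤ)) ^ E) ls 1,
        pvFoldMul (fun n => ((1 + PowerSeries.X ^ n : PowerSeries ℤ))
          * (1 + PowerSeries.X ^ n)) ls 1,
        one_mul, one_mul, one_mul]
      have h2 : (fun n => (1 + PowerSeries.X ^ n) * (1 + PowerSeries.X ^ n))
          = fun n => ((1 + PowerSeries.X ^ n) : PowerSeries ℤ) ^ 2 := by
        funext n; rw [sq]
      rw [h2, pvProdPow, pvProdPow, ← pow_mul]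
      congr 1
      omega
    refine List.map_congr_left fun l hl => ?_
    have hlS : l < S := List.mem_range.1 hl
    have h1 := hA.2 l hlS
    have h2 := hres.2 l hlS
    rw [h1, h2, hser]
  · rw [if_neg hdp]
    have hd0 : d = 0 := by omega
    have hser : ls.foldl (fun F n => F * (1 + PowerSeries.X ^ n) ^ E) (1 : PowerSeries ℤ)
        = 1 := by
      have hE0 : E = 0 := by omega
      rw [hE0, pvFoldMul (fun n => ((1 + PowerSeries.X ^ n : PowerSeries ℤ)) ^ 0) ls 1,
        one_mul, pvProdPow, pow_zero]
    refine List.map_congr_left fun l hl => ?_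
    have hlS : l < S := List.mem_range.1 hl
    have h1 := hA.2 l hlS
    have h2 := (pvRepr_one S hS).2 l hlS
    rw [h1, h2, hser]
theorem pvA0 (d : Int) : bc_character d 0 = [(0, 1)] := rfl

theorem pvB0 (d : Int) (hd : ¬ 0 < d) : bc_character_alt d 0 = [(0, 1)] := by
  show (List.range 1).map
    (fun l => (Int.ofNat l, (if 0 < d then _ else [1]).getD l 0)) = [(0, 1)]
  rw [if_neg hd]
  rfl

theorem pvFoldId {α β : Type} : ∀ (ls : List β) (x : α), ls.foldl (fun a _ => a) x = x := by
  intro ls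
  induction ls with
  | nil => intro x; rfl
  | cons b rest ih => intro x; rw [List.foldl_cons]; exact ih x

theorem pvFoldConstAll {α β : Type} (f : α → β → α) (k : α) (h : ∀ a b, f a b = k) :
    ∀ (ls : List β) (init : α), ls ≠ [] → ls.foldl f init = k := by
  intro ls
  induction ls with
  | nil => intro _ hne; exact absurd rfl hne
  | cons b rest ih =>
    intro init _
    rw [List.foldl_cons]
    rcases rest with _ | ⟨c, rest⟩
    · exact h init b
    · exact ih _ (by simp)

theorem aStep0 (S E n : Nat) (c : List Int) : aStep S E 0 n c = List.replicate S 0 := by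
  unfold aStep
  have hstep : (fun (new : List Int) (level : Nat) =>
      if c.getD level 0 = 0 then new
      else aInner S n level (c.getD level 0) E new 0 0)
      = fun new _ => new := by
    funext new level
    show (if c.getD level 0 = 0 then new else aInner S n level (c.getD level 0) E new 0 0) = new
    split <;> rfl
  rw [hstep]
  exact pvFoldId (List.range S) (List.replicate S 0)

theorem pvGetD_map_range' {α : Type} [Inhabited α] (S : Nat) (f : Nat → α) (z : α) (hS : 0 < S) :
    ((List.range S).map f).getD 0 z = f 0 := by
  simp [List.getD_eq_getElem?_getD, List.getElem?_range, hS]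

theorem pvTight (d max_level : Int) (hd : d < 0) (hm : 1 ≤ max_level) :
    bc_character d max_level ≠ bc_character_alt d max_level := by
  intro hEq
  unfold bc_character bc_character_alt at hEq
  simp only [] at hEq
  set S := (max_level + 1).toNat with hSdef
  have hS : 2 ≤ S := by omega
  have hkc : (2 * d + 1).toNat = 0 := by omega
  rw [hkc, if_neg (by omega : ¬ (0 : Int) < d)] at hEq
  have hne : List.range' 1 (S - 1) ≠ [] := by
    have : (List.range' 1 (S - 1)).length = S - 1 := List.length_range' ..
    intro h; rw [h] at this; simp at this; omega
  rw [pvFoldConstAll _ (List.replicate S 0)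
    (fun a b => aStep0 S (2 * d).toNat b a) _ _ hne] at hEq
  have h1 := congrArg (fun l => l.getD 0 ((0 : Int), (0 : Int))) hEq
  simp only [] at h1
  rw [pvGetD_map_range' S _ _ (by omega), pvGetD_map_range' S _ _ (by omega)] at h1
  simp only [Prod.mk.injEq] at h1
  have h2 : (List.replicate S (0 : Int)).getD 0 0 = 0 := by
    have h0S : 0 < S := by omega
    simp [List.getD_eq_getElem?_getD, List.getElem?_replicate, h0S]
  have h3 : (1 :: List.replicate (S - 1) (0 : Int)).getD 0 0 = 1 := rfl
  rw [h2, h3] at h1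
  exact absurd h1.2 (by norm_num)

-- ===== VERDICT (by name: the statement is the Claim_ definition above) =====
theorem bc_character_spec : Claim_unchanged_bc_character := by
  intro d max_level hdom hpre hnD
  unfold Pre_bc_character at hpre
  unfold D_bc_character at hnD
  by_cases hd : 0 ≤ d
  · exact pvMain d max_level hd hpre
  · have hml : max_level = 0 := by omega
    subst hml
    rw [pvA0, pvB0 d (by omega)]

theorem bc_character_changed : Claim_changed_bc_character := by
  unfold Claim_changed_bc_character; decide

theorem bc_character_tight : Claim_exact_bc_character := by
  intro d max_level hdom hpre hD
  unfold D_bc_character at hD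
  exact pvTight d max_level hD.1 hD.2
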